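-- pv_equiv track=rewrite | github.com/GundalaNikhil/DSA | dsa-problems/Stacks/solutions/STK-010-stadium-max-tracker.py | process
-- ===== SOURCE A (Python) =====
-- def process(ops: list[list[str]]) -> list[str]:
--     result = []
--     main_stack = []
--     max_stack = []
--
--     for op in ops:
--         cmd = op[0]
--
--         if cmd == "PUSH":
--             val = int(op[1])
--             main_stack.append(val)
--             if not max_stack or val >= max_stack[-1]:
--                 max_stack.append(val)
--         elif cmd == "POP":
--             if not main_stack:
--                 result.append("EMPTY")
--             else:
--                 val = main_stack.pop()
--                 result.append(str(val))
--                 if val == max_stack[-1]: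
--                     max_stack.pop()
--         elif cmd == "TOP":
--             if not main_stack:
--                 result.append("EMPTY")
--             else:
--                 result.append(str(main_stack[-1]))
--         elif cmd == "GETMAX":
--             if not main_stack:
--                 result.append("EMPTY")
--             else:
--                 result.append(str(max_stack[-1]))
--
--     return result
-- ===== SOURCE B (Python) =====
-- def process(ops: list[list[str]]) -> list[str]:
--     # Stage 1: simulate a plain int stack, recording each output event as an
--     # optional int (None = empty); no max bookkeeping at all — GETMAX asks max(stack).
--     events = []
--     stack = []
--     for op in ops:
--         c = op[0]
--         if c == "PUSH":
--             stack.append(int(op[1]))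
--         elif c == "POP":
--             events.append(stack.pop() if stack else None)
--         elif c == "TOP":
--             events.append(stack[-1] if stack else None)
--         elif c == "GETMAX":
--             events.append(max(stack) if stack else None)
--     # Stage 2: render the events as strings.
--     return ["EMPTY" if e is None else str(e) for e in events]
-- ===== Notes on version B (the rewrite author's own statement) =====
-- stated objective: simpler
-- what changed: Drops A's auxiliary max-stack and its guarded bookkeeping entirely: B keeps one plain int stack and computes max(stack) on demand at GETMAX, in two stages (simulate recording optional-int events, then render them to strings).
import Mathlib
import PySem

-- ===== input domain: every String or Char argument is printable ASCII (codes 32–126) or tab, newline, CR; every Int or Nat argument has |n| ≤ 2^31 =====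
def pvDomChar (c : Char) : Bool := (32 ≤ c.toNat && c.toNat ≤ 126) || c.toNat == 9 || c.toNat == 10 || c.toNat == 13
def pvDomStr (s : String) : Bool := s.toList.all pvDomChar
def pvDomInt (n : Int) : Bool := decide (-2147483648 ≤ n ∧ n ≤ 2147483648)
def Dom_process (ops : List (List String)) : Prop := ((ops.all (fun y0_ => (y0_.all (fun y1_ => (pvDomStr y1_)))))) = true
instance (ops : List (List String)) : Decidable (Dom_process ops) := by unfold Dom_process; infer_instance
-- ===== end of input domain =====

-- B drops A's auxiliary max-stack and its guarded bookkeeping: one plain int stack,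
-- max(stack) computed on demand at GETMAX, in two stages (simulate events, then render): simpler.

-- ===== PORT A =====
-- Stacks are kept head-as-top (Python's append/pop/[-1] at the end = cons/uncons/headI at
-- the head); the result list is accumulated head-first and reversed at the end.
def processStepA (st : List String × List Int × List Int) (op : List String) :
    List String × List Int × List Int :=
  let res := st.1
  let main := st.2.1
  let maxs := st.2.2
  let cmd := (PySem.List.pyGet? op 0).getD ""          -- op[0]; Pre_ gives op ≠ []
  if cmd = "PUSH" then
    -- int(op[1]); Pre_ guarantees the parse succeeds, so the default 0 is never taken
    let val := (PySem.Int.ofStr? ((PySem.List.pyGet? op 1).getD "")).getD 0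
    let maxs' := if maxs = [] ∨ val ≥ maxs.headI then val :: maxs else maxs
    (res, val :: main, maxs')
  else if cmd = "POP" then
    match main with
    | [] => ("EMPTY" :: res, main, maxs)
    | v :: rest =>
      let maxs' := if v = maxs.headI then maxs.tail else maxs
      (PySem.Int.toStr v :: res, rest, maxs')
  else if cmd = "TOP" then
    match main with
    | [] => ("EMPTY" :: res, main, maxs)
    | v :: _ => (PySem.Int.toStr v :: res, main, maxs)
  else if cmd = "GETMAX" then
    match main with
    | [] => ("EMPTY" :: res, main, maxs)
    | _ :: _ => (PySem.Int.toStr maxs.headI :: res, main, maxs)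
  else st

def process (ops : List (List String)) : List String :=
  (ops.foldl processStepA ([], [], [])).1.reverse

-- ===== PORT B =====
-- Stage 1 of Source B: simulate a plain int stack (head = top), recording each output event as
-- an Option Int (none = empty); events accumulate head-first and are reversed at the end.
-- max(stack) is PySem.List.max? with the identity key (order-independent on ints).
def simStepB (st : List (Option Int) × List Int) (op : List String) :
    List (Option Int) × List Int :=
  let events := st.1
  let stack := st.2
  let c := (PySem.List.pyGet? op 0).getD ""
  if c = "PUSH" then
    (events, ((PySem.Int.ofStr? ((PySem.List.pyGet? op 1).getD "")).getD 0) :: stack)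
  else if c = "POP" then
    match stack with
    | [] => (none :: events, stack)
    | v :: s => (some v :: events, s)
  else if c = "TOP" then
    match stack with
    | [] => (none :: events, stack)
    | v :: _ => (some v :: events, stack)
  else if c = "GETMAX" then
    match stack with
    | [] => (none :: events, stack)
    | _ :: _ => (PySem.List.max? stack (fun y => y) :: events, stack)
  else st

-- Stage 2 of Source B: render an event as a string.
def renderEventB : Option Int → String
  | none => "EMPTY"
  | some v => PySem.Int.toStr v

def process_alt (ops : List (List String)) : List String :=
  ((ops.foldl simStepB ([], [])).1.reverse).map renderEventB

-- ===== PRECONDITION & SPEC =====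
-- Pre_ excludes exactly the inputs on which Python A raises: an empty op (IndexError on
-- op[0]) or a PUSH without a second element or whose second element int() rejects
-- (IndexError/ValueError).
def Pre_process (ops : List (List String)) : Prop :=
  ∀ op ∈ ops, op ≠ [] ∧
    (op.headI = "PUSH" →
      1 < op.length ∧ (PySem.Int.ofStr? ((PySem.List.pyGet? op 1).getD "")).isSome = true)
instance (ops : List (List String)) : Decidable (Pre_process ops) := by
  unfold Pre_process; infer_instance

def pvWitness_process : List (List String) :=
  [["PUSH", "3"], ["PUSH", "1"], ["GETMAX"], ["POP"], ["TOP"], ["POP"], ["POP"]]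

def Spec_process (ops : List (List String)) (out : List String) : Prop := out = process_alt ops
instance (ops : List (List String)) (out : List String) : Decidable (Spec_process ops out) := by
  unfold Spec_process; infer_instance

-- ===== CLAIM (what is proved, stated in full; the proofs are below) =====
def Claim_equal_process : Prop :=
  ∀ (ops : List (List String)), Dom_process ops → Pre_process ops → Spec_process ops (process ops)

-- ===== LEMMAS AND PROOFS =====

-- A's max stack as a function of the main-stack contents (head = top)
def maxStackOf : List Int → List Int
  | [] => []
  | v :: r =>
    let m := maxStackOf r
    if m = [] ∨ v ≥ m.headI then v :: m else m

lemma maxStack_ne_nil (v : Int) (r : List Int) : maxStackOf (v :: r) ≠ [] := by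
  simp only [maxStackOf]
  split_ifs with h
  · simp
  · intro hc
    exact (not_or.mp h).1 hc

lemma maxStack_pop (v : Int) (r : List Int) :
    (if v = (maxStackOf (v :: r)).headI then (maxStackOf (v :: r)).tail
     else maxStackOf (v :: r)) = maxStackOf r := by
  simp only [maxStackOf]
  split_ifs with h hv hv
  · rfl
  · exact absurd rfl hv
  · rw [not_or] at h
    have := h.2
    omega
  · rfl

lemma foldl_max_max (t : List Int) : ∀ a b : Int, t.foldl max (max a b) = max a (t.foldl max b) := by
  induction t with
  | nil => intro a b; rfl
  | cons c t ih =>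
    intro a b
    simp only [List.foldl_cons, max_assoc]
    exact ih a (max b c)

-- A's max-stack top is the running max of the stack contents
lemma maxStack_headI : ∀ (r : List Int) (v : Int),
    (maxStackOf (v :: r)).headI = r.foldl max v := by
  intro r
  induction r with
  | nil => intro v; simp [maxStackOf]
  | cons w t ih =>
    intro v
    have h1 := maxStack_ne_nil w t
    have hm : maxStackOf (v :: w :: t) =
        if maxStackOf (w :: t) = [] ∨ v ≥ (maxStackOf (w :: t)).headI
        then v :: maxStackOf (w :: t) else maxStackOf (w :: t) := rfl
    rw [hm]
    rw [List.foldl_cons, foldl_max_max]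
    by_cases hge : v ≥ (maxStackOf (w :: t)).headI
    · rw [if_pos (Or.inr hge), List.headI_cons]
      rw [ih w] at hge
      omega
    · rw [if_neg (by tauto), ih w]
      rw [ih w] at hge
      omega

lemma step_corr (op : List String) (ev : List (Option Int)) (main : List Int) :
    ∃ ev₂ main₂,
      processStepA (ev.map renderEventB, main, maxStackOf main) op
        = (ev₂.map renderEventB, main₂, maxStackOf main₂) ∧
      simStepB (ev, main) op = (ev₂, main₂) := by
  simp only [processStepA, simStepB]
  by_cases hp : (PySem.List.pyGet? op 0).getD "" = "PUSH"
  · exact ⟨ev, ((PySem.Int.ofStr? ((PySem.List.pyGet? op 1).getD "")).getD 0) :: main,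
      by simp [hp, maxStackOf], by simp [hp]⟩
  · by_cases hpop : (PySem.List.pyGet? op 0).getD "" = "POP"
    · cases main with
      | nil => exact ⟨none :: ev, [], by simp [hpop, maxStackOf, renderEventB],
          by simp [hpop]⟩
      | cons v rest =>
        exact ⟨some v :: ev, rest, by simp [hpop, maxStack_pop, renderEventB],
          by simp [hpop]⟩
    · by_cases htop : (PySem.List.pyGet? op 0).getD "" = "TOP"
      · cases main with
        | nil => exact ⟨none :: ev, [], by simp [htop, maxStackOf, renderEventB],
            by simp [htop]⟩
        | cons v rest =>
          exact ⟨some v :: ev, v :: rest, by simp [htop, renderEventB], by simp [htop]⟩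
      · by_cases hm : (PySem.List.pyGet? op 0).getD "" = "GETMAX"
        · cases main with
          | nil => exact ⟨none :: ev, [], by simp [hm, maxStackOf, renderEventB],
              by simp [hm]⟩
          | cons v rest =>
            refine ⟨some (rest.foldl max v) :: ev, v :: rest, ?_, ?_⟩
            · simp [hm, renderEventB, maxStack_headI]
            · simp [hm, PySem.List.max?_id_cons]
        · exact ⟨ev, main, by simp [hp, hpop, htop, hm], by simp [hp, hpop, htop, hm]⟩

lemma loop_corr : ∀ (ops : List (List String)) (ev : List (Option Int)) (main : List Int),
    ∃ ev' main',
      ops.foldl processStepA (ev.map renderEventB, main, maxStackOf main)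
        = (ev'.map renderEventB, main', maxStackOf main') ∧
      ops.foldl simStepB (ev, main) = (ev', main') := by
  intro ops
  induction ops with
  | nil => exact fun ev main => ⟨ev, main, rfl, rfl⟩
  | cons op ops ih =>
    intro ev main
    obtain ⟨ev₂, main₂, hA, hB⟩ := step_corr op ev main
    rw [List.foldl_cons, List.foldl_cons, hA, hB]
    exact ih ev₂ main₂

-- ===== VERDICT (by name: the statement is the Claim_ definition above) =====
theorem process_spec : Claim_equal_process := by
  intro ops _ _
  unfold Spec_process process process_alt
  obtain ⟨ev', main', hA, hB⟩ := loop_corr ops [] []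
  rw [show (([], [], []) : List String × List Int × List Int)
        = (List.map renderEventB [], [], maxStackOf []) from rfl, hA,
      show (([], []) : List (Option Int) × List Int) = ([], []) from rfl, hB,
      ← List.map_reverse]
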